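-- pv_equiv track=rewrite | github.com/anupyadav27/threat-engine | engine_secops/scanner_engine/java_scanner/logic_implementations.py | custom_coding_style_brace_placement
-- ===== SOURCE A (Python) =====
-- def custom_coding_style_brace_placement(node):
--     """
--     Detect open curly braces '{' that are not at the end of a line.
--     Returns True if violation is found.
--     """
--     if isinstance(node, dict):
--         source_code = node.get('source', '')
--         if not source_code:
--             return False
--         lines = source_code.split('\n')
--         for line in lines:
--             line_strip = line.strip()
--             # Check for lines that are only '{' (not at end of code line)
--             if line_strip == '{':
--                 return True
--             # Check for lines ending with '{' (compliant)
--             if '{' in line and not line_strip.endswith('{'):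
--                 # If '{' is present but not at the end, it's a violation
--                 return True
--     return False
-- ===== SOURCE B (Python) =====
-- def custom_coding_style_brace_placement(node):
--     """Single streaming pass over the source with a per-line state machine
--     (no split into lines, no strip): track whether the current line has a '{',
--     its last non-whitespace char, and whether it has >= 2 non-whitespace chars;
--     decide at each newline."""
--     if not isinstance(node, dict):
--         return False
--     source = node.get('source', '')
--     if not source:
--         return False
--     has_brace = False   # current line contains '{'
--     last_nonws = ''     # last non-whitespace char seen on current line
--     multi = False       # current line has at least two non-whitespace chars
--     for ch in source + '\n':
--         if ch == '\n':
--             if has_brace and not (last_nonws == '{' and multi):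
--                 return True
--             has_brace, last_nonws, multi = False, '', False
--         else:
--             if ch == '{':
--                 has_brace = True
--             if not ch.isspace():
--                 multi = multi or (last_nonws != '')
--                 last_nonws = ch
--     return False
-- ===== Notes on version B (the rewrite author's own statement) =====
-- stated objective: alternative
-- what changed: Replaces A's split-into-lines plus per-line strip()/endswith() string processing with a single streaming character pass over the source: a per-line state machine tracking (line has '{', last non-whitespace char, line has >=2 non-whitespace chars), with the verdict decided at each newline; no line list, no strip, no intermediate strings.
import Mathlib
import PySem

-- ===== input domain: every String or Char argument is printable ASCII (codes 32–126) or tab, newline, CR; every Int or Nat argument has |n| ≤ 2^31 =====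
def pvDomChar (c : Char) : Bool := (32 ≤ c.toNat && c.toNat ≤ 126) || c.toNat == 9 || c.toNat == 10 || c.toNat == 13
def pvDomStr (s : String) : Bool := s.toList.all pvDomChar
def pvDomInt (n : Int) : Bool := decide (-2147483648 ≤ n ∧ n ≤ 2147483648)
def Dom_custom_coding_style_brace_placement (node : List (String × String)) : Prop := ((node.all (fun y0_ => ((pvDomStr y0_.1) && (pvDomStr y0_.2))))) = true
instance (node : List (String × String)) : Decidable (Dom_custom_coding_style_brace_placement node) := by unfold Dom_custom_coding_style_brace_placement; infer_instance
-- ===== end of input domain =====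

-- B replaces A's split-into-lines + per-line strip()/endswith() checks with a single streaming
-- pass over the source: a per-line state machine (has-brace, last non-ws char, ≥2 non-ws chars)
-- decided at each newline (alternative).


-- ===== PORT A =====
-- the 'for line in lines' loop with its two early returns
def pvLoopA : List String → Bool
  | [] => false
  | line :: rest =>
    let lineStrip := PySem.Str.strip line
    if lineStrip = "{" then true
    else if PySem.Str.isIn "{" line && !(PySem.Str.endswith lineStrip "{") then true
    else pvLoopA rest

def custom_coding_style_brace_placement (node : List (String × String)) : Bool :=
  -- node is a dict, so the isinstance branch is always taken
  let source := (PySem.Dict.mk node).getD "source" ""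
  if source = "" then false
  else pvLoopA ((PySem.Str.split? source "\n").getD [])   -- sep "\n" ≠ "", split? is some

-- ===== PORT B =====
-- Source B's 'for ch in source + "\n"' loop with its early return; the three loop variables
-- (has_brace, last_nonws, multi) are the three state arguments (last_nonws '' = none)
def pvScanB : List Char → Bool → Option Char → Bool → Bool
  | [], _, _, _ => false
  | c :: cs, hasBrace, lastNonWs, multi =>
    if c = '\n' then
      if hasBrace && !(lastNonWs == some '{' && multi) then true
      else pvScanB cs false none false
    else
      let hasBrace := if c = '{' then true else hasBrace
      if PySem.Chars.isspace c then pvScanB cs hasBrace lastNonWs multi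
      else pvScanB cs hasBrace (some c) (multi || lastNonWs.isSome)

def custom_coding_style_brace_placement_alt (node : List (String × String)) : Bool :=
  let source := (PySem.Dict.mk node).getD "source" ""
  if source = "" then false
  else pvScanB (source.toList ++ ['\n']) false none false   -- 'source + "\n"'

-- ===== PRECONDITION & SPEC =====
def Spec_custom_coding_style_brace_placement (node : List (String × String)) (out : Bool) : Prop := out = custom_coding_style_brace_placement_alt node
instance (node : List (String × String)) (out : Bool) : Decidable (Spec_custom_coding_style_brace_placement node out) := by unfold Spec_custom_coding_style_brace_placement; infer_instance

-- ===== CLAIM (what is proved, stated in full; the proofs are below) =====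
def Claim_equal_custom_coding_style_brace_placement : Prop := ∀ (node : List (String × String)), Dom_custom_coding_style_brace_placement node → Spec_custom_coding_style_brace_placement node (custom_coding_style_brace_placement node)

-- ===== LEMMAS AND PROOFS =====

-- proof-side abstractions of B's state machine
def pvStep (s : Bool × Option Char × Bool) (c : Char) : Bool × Option Char × Bool :=
  (if c = '{' then true else s.1,
   if PySem.Chars.isspace c then (s.2.1, s.2.2) else (some c, s.2.2 || s.2.1.isSome))

def pvEndCheck (s : Bool × Option Char × Bool) : Bool := s.1 && !(s.2.1 == some '{' && s.2.2)

def pvInit : Bool × Option Char × Bool := (false, none, false)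

-- B's scan, phrased over the remaining characters with the state as one tuple
def pvLinesAny : (Bool × Option Char × Bool) → List Char → Bool
  | st, [] => pvEndCheck st
  | st, c :: rest => if c = '\n' then pvEndCheck st || pvLinesAny pvInit rest
                     else pvLinesAny (pvStep st c) rest

-- structural splitter on '\n' with an explicit current-line accumulator
def pvMySplit : List Char → List Char → List (List Char)
  | pre, [] => [pre]
  | pre, c :: rest => if c = '\n' then pre :: pvMySplit [] rest else pvMySplit (pre ++ [c]) rest

-- A's per-line test, at the character level
def pvATest (l : List Char) : Bool :=
  (decide (PySem.Chars.strip l = ['{'])) ||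
    (PySem.Chars.isIn ['{'] l && !(PySem.Chars.endswith (PySem.Chars.strip l) ['{']))

def pvLineViol (l : List Char) : Bool := pvEndCheck (List.foldl pvStep pvInit l)

-- head of a dropWhile never satisfies the predicate
lemma pv_dropWhile_head_false {α : Type} {p : α → Bool} :
    ∀ {l : List α} {a : α} {as : List α}, l.dropWhile p = a :: as → p a = false := by
  intro l
  induction l with
  | nil => intro a as h; cases h
  | cons x xs ih =>
    intro a as h
    rw [List.dropWhile_cons] at h
    split at h
    · exact ih h
    · cases h
      next hx => exact Bool.eq_false_iff.mpr hx

-- A's per-line test in last-non-whitespace form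
lemma pv_core (l : List Char) :
    pvATest l =
    (match (l.reverse).dropWhile PySem.Chars.isspace with
     | [] => false
     | c :: rest =>
       if c ≠ '{' then PySem.Chars.isIn ['{'] l
       else ((rest.dropWhile PySem.Chars.isspace).isEmpty)) := by
  unfold pvATest
  have hl : l.takeWhile PySem.Chars.isspace ++ l.dropWhile PySem.Chars.isspace = l :=
    List.takeWhile_append_dropWhile
  have hdrop1 : (l.takeWhile PySem.Chars.isspace).reverse.dropWhile PySem.Chars.isspace = [] :=
    List.dropWhile_eq_nil_iff.mpr (fun x hx => List.mem_takeWhile_imp (List.mem_reverse.mp hx))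
  have hrev : l.reverse
      = (l.dropWhile PySem.Chars.isspace).reverse ++ (l.takeWhile PySem.Chars.isspace).reverse := by
    rw [← List.reverse_append, hl]
  have hstrip : PySem.Chars.strip l
      = ((l.dropWhile PySem.Chars.isspace).reverse.dropWhile PySem.Chars.isspace).reverse := rfl
  have hmain : l.reverse.dropWhile PySem.Chars.isspace
      = if ((l.dropWhile PySem.Chars.isspace).reverse.dropWhile PySem.Chars.isspace).isEmpty
        then []
        else ((l.dropWhile PySem.Chars.isspace).reverse.dropWhile PySem.Chars.isspace)
              ++ (l.takeWhile PySem.Chars.isspace).reverse := by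
    rw [hrev, List.dropWhile_append, hdrop1]
  cases hrc : (l.dropWhile PySem.Chars.isspace).reverse.dropWhile PySem.Chars.isspace with
  | nil =>
    -- whitespace-only line: both sides are false
    have hstrip0 : PySem.Chars.strip l = [] := by rw [hstrip, hrc]; rfl
    have hallrev : ∀ x ∈ (l.dropWhile PySem.Chars.isspace).reverse, PySem.Chars.isspace x = true :=
      List.dropWhile_eq_nil_iff.mp hrc
    have htnil : l.dropWhile PySem.Chars.isspace = [] := by
      cases htc : l.dropWhile PySem.Chars.isspace with
      | nil => rfl
      | cons a as =>
        have ha : PySem.Chars.isspace a = false := pv_dropWhile_head_false htc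
        have ha' : PySem.Chars.isspace a = true := hallrev a (by rw [htc]; simp)
        rw [ha] at ha'; cases ha'
    have halll : ∀ x ∈ l, PySem.Chars.isspace x = true := by
      intro x hx
      rw [← hl] at hx
      rcases List.mem_append.mp hx with h | h
      · exact List.mem_takeWhile_imp h
      · rw [htnil] at h; cases h
    have hnoBrace : PySem.Chars.isIn ['{'] l = false := by
      rw [PySem.Chars.isIn_eq_false_iff]
      intro hinf
      have hmem : '{' ∈ l := (List.singleton_infix_iff '{' l).mp hinf
      have := halll '{' hmem
      have hws : PySem.Chars.isspace '{' = false := by decide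
      rw [hws] at this; cases this
    rw [hmain, hrc]
    simp [hstrip0, hnoBrace]
  | cons c rs =>
    have hne : l.dropWhile PySem.Chars.isspace ≠ [] := by
      intro h0; rw [h0] at hrc; cases hrc
    have hstrip2 : PySem.Chars.strip l = rs.reverse ++ [c] := by
      rw [hstrip, hrc, List.reverse_cons]
    have hlast : (PySem.Chars.strip l).getLast? = some c := by
      rw [hstrip2]; exact List.getLast?_concat
    have hmatch : l.reverse.dropWhile PySem.Chars.isspace
        = c :: (rs ++ (l.takeWhile PySem.Chars.isspace).reverse) := by
      rw [hmain, hrc]; simp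
    rw [hmatch]
    by_cases hc : c = '{'
    · subst hc
      -- line's last non-whitespace char is '{'
      have hend : PySem.Chars.endswith (PySem.Chars.strip l) ['{'] = true :=
        (PySem.Chars.endswith_iff _ _).mpr ⟨rs.reverse, hstrip2.symm⟩
      have hdec : decide (PySem.Chars.strip l = ['{']) = decide (rs = []) := by
        rw [decide_eq_decide, hstrip2]
        constructor
        · intro h
          have hlen := congrArg List.length h
          simp at hlen
          exact List.eq_nil_of_length_eq_zero (by simpa using hlen)
        · intro h; rw [h]; rfl
      have hkey : (rs.dropWhile PySem.Chars.isspace).isEmpty = decide (rs = []) := by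
        cases hrs : rs with
        | nil => simp
        | cons b bs =>
          -- rs is nonempty; its last char is the line's first non-whitespace char, so not all whitespace
          obtain ⟨pre, hpre⟩ :=
            List.dropWhile_suffix (l := (l.dropWhile PySem.Chars.isspace).reverse)
              PySem.Chars.isspace
          have hgl : ('{' :: rs).getLast? = (l.dropWhile PySem.Chars.isspace).reverse.getLast? := by
            rw [← hpre, hrc]
            exact (List.getLast?_append_of_ne_nil pre (by simp)).symm
          have hgl2 : (l.dropWhile PySem.Chars.isspace).reverse.getLast?
              = (l.dropWhile PySem.Chars.isspace).head? := List.getLast?_reverse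
          cases htc : l.dropWhile PySem.Chars.isspace with
          | nil => exact absurd htc hne
          | cons a as =>
            have ha : PySem.Chars.isspace a = false := pv_dropWhile_head_false htc
            have hgla : ('{' :: rs).getLast? = some a := by
              rw [hgl, hgl2, htc]; rfl
            have hamem : a ∈ rs := by
              rw [hrs] at hgla ⊢
              exact List.mem_of_getLast? (by simpa using hgla)
            have hdne : rs.dropWhile PySem.Chars.isspace ≠ [] := by
              intro h0
              have := List.dropWhile_eq_nil_iff.mp h0 a hamem
              rw [ha] at this; cases this
            have h1 : (rs.dropWhile PySem.Chars.isspace).isEmpty = false := by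
              rw [Bool.eq_false_iff]
              intro hcontra
              exact hdne (List.isEmpty_iff.mp hcontra)
            have h2 : decide (rs = []) = false := by simp [hrs]
            rw [← hrs, h1, h2]
      have hrhs : (List.dropWhile PySem.Chars.isspace
            (rs ++ (l.takeWhile PySem.Chars.isspace).reverse)).isEmpty
          = (rs.dropWhile PySem.Chars.isspace).isEmpty := by
        rw [List.dropWhile_append]
        cases h : (rs.dropWhile PySem.Chars.isspace).isEmpty with
        | true => simp [hdrop1]
        | false =>
          rw [if_neg (by decide)]
          have hne3 : List.dropWhile PySem.Chars.isspace rs ≠ [] := by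
            intro h0; rw [h0] at h; simp at h
          cases hdc : List.dropWhile PySem.Chars.isspace rs with
          | nil => exact absurd hdc hne3
          | cons x xs => simp
      simp only [hend, hdec, Bool.not_true, Bool.and_false, Bool.or_false]
      simp only [ne_eq, not_true_eq_false, if_false]
      rw [hrhs, hkey]
    · -- last non-whitespace char is not '{'
      have hneq : PySem.Chars.strip l ≠ ['{'] := by
        intro h0; rw [h0] at hlast
        simp at hlast
        exact hc hlast.symm
      have hend : PySem.Chars.endswith (PySem.Chars.strip l) ['{'] = false := by
        cases hE : PySem.Chars.endswith (PySem.Chars.strip l) ['{'] with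
        | false => rfl
        | true =>
          obtain ⟨pre, hpre⟩ := (PySem.Chars.endswith_iff _ _).mp hE
          rw [← hpre, List.getLast?_concat] at hlast
          exact absurd (Option.some_injective _ hlast).symm hc
      simp [hneq, hend, hc]

-- the state after feeding a whole line: has-brace, last non-ws char, ≥2 non-ws chars
lemma pv_state_char (l : List Char) :
    List.foldl pvStep pvInit l =
      (decide ('{' ∈ l),
       (l.filter (fun c => !PySem.Chars.isspace c)).getLast?,
       decide (2 ≤ (l.filter (fun c => !PySem.Chars.isspace c)).length)) := by
  induction l using List.reverseRecOn with
  | nil => simp [pvInit]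
  | append_singleton l c ih =>
    rw [List.foldl_append, List.foldl_cons, List.foldl_nil, ih]
    have h1 : (if c = '{' then true else decide ('{' ∈ l)) = decide ('{' ∈ l ++ [c]) := by
      by_cases hcb : c = '{'
      · subst hcb; simp
      · have hx : ('{' = c) ↔ False := ⟨fun h => hcb h.symm, False.elim⟩
        simp [hcb, hx]
    by_cases hws : PySem.Chars.isspace c = true
    · have hf : (l ++ [c]).filter (fun c => !PySem.Chars.isspace c)
          = l.filter (fun c => !PySem.Chars.isspace c) := by
        simp [List.filter_append, hws]
      refine Prod.ext ?_ (Prod.ext ?_ ?_)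
      · show (if c = '{' then true else decide ('{' ∈ l)) = decide ('{' ∈ l ++ [c])
        exact h1
      · show (if PySem.Chars.isspace c
              then ((l.filter (fun c => !PySem.Chars.isspace c)).getLast?,
                    decide (2 ≤ (l.filter (fun c => !PySem.Chars.isspace c)).length))
              else _).1 = _
        rw [if_pos hws, hf]
      · show (if PySem.Chars.isspace c
              then ((l.filter (fun c => !PySem.Chars.isspace c)).getLast?,
                    decide (2 ≤ (l.filter (fun c => !PySem.Chars.isspace c)).length))
              else _).2 = _
        rw [if_pos hws, hf]
    · have hws' : PySem.Chars.isspace c = false := Bool.eq_false_iff.mpr hws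
      have hf : (l ++ [c]).filter (fun c => !PySem.Chars.isspace c)
          = l.filter (fun c => !PySem.Chars.isspace c) ++ [c] := by
        simp [List.filter_append, hws']
      refine Prod.ext ?_ (Prod.ext ?_ ?_)
      · show (if c = '{' then true else decide ('{' ∈ l)) = decide ('{' ∈ l ++ [c])
        exact h1
      · show (if PySem.Chars.isspace c then _
              else (some c,
                    decide (2 ≤ (l.filter (fun c => !PySem.Chars.isspace c)).length)
                      || ((l.filter (fun c => !PySem.Chars.isspace c)).getLast?).isSome)).1
            = ((l ++ [c]).filter (fun c => !PySem.Chars.isspace c)).getLast?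
        rw [if_neg hws, hf]
        exact List.getLast?_concat.symm
      · show (if PySem.Chars.isspace c then _
              else (some c,
                    decide (2 ≤ (l.filter (fun c => !PySem.Chars.isspace c)).length)
                      || ((l.filter (fun c => !PySem.Chars.isspace c)).getLast?).isSome)).2
            = decide (2 ≤ ((l ++ [c]).filter (fun c => !PySem.Chars.isspace c)).length)
        rw [if_neg hws, hf]
        rcases hgl : (l.filter (fun c => !PySem.Chars.isspace c)) with _ | ⟨a, as⟩
        · simp
        · have hs : ((a :: as).getLast?).isSome = true := by
            rw [Option.isSome_iff_ne_none]
            simp [List.getLast?_eq_none_iff]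
          rw [hs, Bool.or_true]
          simp

-- A's per-line test equals B's end-of-line check on the accumulated state
lemma pv_perLine (l : List Char) : pvATest l = pvLineViol l := by
  rw [pv_core]
  unfold pvLineViol pvEndCheck
  rw [pv_state_char]
  have hfl : l.filter (fun c => !PySem.Chars.isspace c)
      = (l.reverse.filter (fun c => !PySem.Chars.isspace c)).reverse := by
    rw [← List.filter_reverse, List.reverse_reverse]
  have hsplit : l.reverse.filter (fun c => !PySem.Chars.isspace c)
      = (l.reverse.dropWhile PySem.Chars.isspace).filter (fun c => !PySem.Chars.isspace c) := by
    conv_lhs => rw [← List.takeWhile_append_dropWhile (p := PySem.Chars.isspace) (l := l.reverse)]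
    rw [List.filter_append]
    have : (l.reverse.takeWhile PySem.Chars.isspace).filter (fun c => !PySem.Chars.isspace c) = [] := by
      rw [List.filter_eq_nil_iff]
      intro a ha
      simp [List.mem_takeWhile_imp ha]
    rw [this, List.nil_append]
  cases hrc : l.reverse.dropWhile PySem.Chars.isspace with
  | nil =>
    have hfe : l.filter (fun c => !PySem.Chars.isspace c) = [] := by
      rw [hfl, hsplit, hrc]; rfl
    have hnb : ('{' ∈ l) = False := by
      simp only [eq_iff_iff, iff_false]
      intro hm
      have : '{' ∈ l.filter (fun c => !PySem.Chars.isspace c) :=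
        List.mem_filter.mpr ⟨hm, by decide⟩
      rw [hfe] at this; cases this
    simp [hnb, hfe]
  | cons c rs =>
    have hcws : PySem.Chars.isspace c = false := pv_dropWhile_head_false hrc
    have hf2 : l.filter (fun c => !PySem.Chars.isspace c)
        = ((rs.filter (fun c => !PySem.Chars.isspace c)).reverse) ++ [c] := by
      rw [hfl, hsplit, hrc]
      simp [hcws]
    by_cases hc : c = '{'
    · subst hc
      have hmem : '{' ∈ l := by
        have : '{' ∈ l.filter (fun c => !PySem.Chars.isspace c) := by
          rw [hf2]; simp
        exact (List.mem_filter.mp this).1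
      have hlast : (l.filter (fun c => !PySem.Chars.isspace c)).getLast? = some '{' := by
        rw [hf2]; exact List.getLast?_concat
      have hlen : (l.filter (fun c => !PySem.Chars.isspace c)).length
          = (rs.filter (fun c => !PySem.Chars.isspace c)).length + 1 := by
        rw [hf2]; simp
      have hkey : (rs.dropWhile PySem.Chars.isspace).isEmpty
          = !decide (2 ≤ (l.filter (fun c => !PySem.Chars.isspace c)).length) := by
        rw [hlen]
        rcases hdw : rs.dropWhile PySem.Chars.isspace with _ | ⟨a, as⟩
        · have : rs.filter (fun c => !PySem.Chars.isspace c) = [] := by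
            rw [List.filter_eq_nil_iff]
            intro x hx
            simp [List.dropWhile_eq_nil_iff.mp hdw x hx]
          simp [this]
        · have ha : PySem.Chars.isspace a = false := pv_dropWhile_head_false hdw
          have hamem : a ∈ rs := by
            have : a ∈ rs.dropWhile PySem.Chars.isspace := by rw [hdw]; simp
            exact (List.dropWhile_sublist _).subset this
          have : a ∈ rs.filter (fun c => !PySem.Chars.isspace c) :=
            List.mem_filter.mpr ⟨hamem, by simp [ha]⟩
          have h1 : 1 ≤ (rs.filter (fun c => !PySem.Chars.isspace c)).length :=
            Nat.one_le_iff_ne_zero.mpr (by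
              intro h0
              rw [List.eq_nil_of_length_eq_zero h0] at this
              cases this)
          have h2 : (2 ≤ (rs.filter (fun c => !PySem.Chars.isspace c)).length + 1) := by omega
          simp [h2]
      simp [hmem, hlast, hkey]
    · have hlast : (l.filter (fun c => !PySem.Chars.isspace c)).getLast? = some c := by
        rw [hf2]; exact List.getLast?_concat
      have hiff : PySem.Chars.isIn ['{'] l = decide ('{' ∈ l) := by
        rcases h : PySem.Chars.isIn ['{'] l with _ | _
        · have := PySem.Chars.isIn_eq_false_iff ['{'] l |>.mp h
          rw [List.singleton_infix_iff] at this
          simp [this]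
        · have := PySem.Chars.isIn_iff_infix ['{'] l |>.mp h
          rw [List.singleton_infix_iff] at this
          simp [this]
      dsimp only
      rw [if_pos hc, hlast]
      have hsc : ((some c : Option Char) == some '{') = false := by simp [hc]
      rw [hsc]
      simp [hiff]

-- A's early-return loop is `any` of A's per-line test (over char lists)
lemma pv_loop_eq (ls : List String) :
    pvLoopA ls = (ls.map String.toList).any pvATest := by
  induction ls with
  | nil => rfl
  | cons line rest ih =>
    have hlit : "{".toList = ['{'] := by decide
    have hAtest : pvATest line.toList
        = ((decide (PySem.Str.strip line = "{")) ||
            (PySem.Str.isIn "{" line && !(PySem.Str.endswith (PySem.Str.strip line) "{"))) := by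
      unfold pvATest
      have hd : decide (PySem.Str.strip line = "{")
          = decide (PySem.Chars.strip line.toList = ['{']) := by
        rw [decide_eq_decide, ← String.toList_inj, PySem.Str.toList_strip, hlit]
      simp [hd, PySem.Str.isIn_eq, PySem.Str.endswith_eq, PySem.Str.toList_strip, hlit]
    rw [pvLoopA, List.map_cons, List.any_cons, ih, hAtest]
    by_cases h1 : PySem.Str.strip line = "{" <;> simp [h1]

-- B's scan, restated with the state as a tuple
lemma pv_scan_linesAny : ∀ (s : List Char) (st : Bool × Option Char × Bool),
    pvScanB (s ++ ['\n']) st.1 st.2.1 st.2.2 = pvLinesAny st s := by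
  intro s
  induction s with
  | nil =>
    intro st
    show pvScanB ['\n'] st.1 st.2.1 st.2.2 = pvLinesAny st []
    rw [pvScanB, pvLinesAny]
    rw [if_pos rfl]
    by_cases h : (st.1 && !(st.2.1 == some '{' && st.2.2)) = true
    · rw [if_pos h]; unfold pvEndCheck; rw [h]
    · rw [if_neg h]
      unfold pvEndCheck
      rw [Bool.eq_false_iff.mpr h]
      rfl
  | cons c cs ih =>
    intro st
    show pvScanB (c :: (cs ++ ['\n'])) st.1 st.2.1 st.2.2 = pvLinesAny st (c :: cs)
    rw [pvScanB, pvLinesAny]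
    by_cases hn : c = '\n'
    · subst hn
      rw [if_pos rfl, if_pos rfl]
      by_cases h : (st.1 && !(st.2.1 == some '{' && st.2.2)) = true
      · rw [if_pos h]; unfold pvEndCheck; rw [h]; rfl
      · rw [if_neg h]
        unfold pvEndCheck
        rw [Bool.eq_false_iff.mpr h, Bool.false_or]
        exact ih pvInit
    · rw [if_neg hn, if_neg hn]
      by_cases hws : PySem.Chars.isspace c = true
      · rw [if_pos hws]
        have := ih (if c = '{' then true else st.1, st.2.1, st.2.2)
        rw [this]
        unfold pvStep
        rw [if_pos hws]
      · rw [if_neg hws]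
        have := ih (if c = '{' then true else st.1, some c, st.2.2 || st.2.1.isSome)
        rw [this]
        unfold pvStep
        rw [if_neg hws]

-- the scan over the rest of the source is `any` of the per-line check over the split lines
lemma pv_linesAny_split : ∀ (s pre : List Char),
    pvLinesAny (List.foldl pvStep pvInit pre) s = (pvMySplit pre s).any pvLineViol := by
  intro s
  induction s with
  | nil =>
    intro pre
    rw [pvLinesAny, pvMySplit]
    simp [pvLineViol]
  | cons c cs ih =>
    intro pre
    rw [pvLinesAny, pvMySplit]
    by_cases hn : c = '\n'
    · subst hn
      rw [if_pos rfl, if_pos rfl, List.any_cons]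
      have := ih ([] : List Char)
      rw [List.foldl_nil] at this
      rw [this, pvLineViol]
    · rw [if_neg hn, if_neg hn]
      have := ih (pre ++ [c])
      rw [List.foldl_append, List.foldl_cons, List.foldl_nil] at this
      exact this

-- PySem's fuel-based splitOn on sep '\n' equals the structural splitter
lemma pv_go_mySplit : ∀ (fuel : Nat) (l pre : List Char) (acc : List (List Char)),
    l.length < fuel →
    PySem.Chars.splitOn.go ['\n'] fuel l pre.reverse acc = acc.reverse ++ pvMySplit pre l := by
  intro fuel
  induction fuel with
  | zero => intro l pre acc h; omega
  | succ f ih =>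
    intro l pre acc h
    cases l with
    | nil =>
      rw [PySem.Chars.splitOn.go, pvMySplit]
      · simp
      · omega
    | cons c rest =>
      have hlen : rest.length < f := by simp at h; omega
      rw [PySem.Chars.splitOn.go, pvMySplit]
      by_cases hn : c = '\n'
      · subst hn
        rw [if_pos (by simp [List.isPrefixOf]), if_pos rfl]
        have hih := ih (List.drop ['\n'].length ('\n' :: rest)) [] (pre.reverse.reverse :: acc) (by simpa using hlen)
        simp only [List.reverse_nil] at hih
        simp only [List.length_cons, List.length_nil, List.drop_succ_cons, List.drop_zero] at hih ⊢
        rw [hih]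
        simp
      · rw [if_neg (by simp [List.isPrefixOf]; intro h'; exact hn h'.symm), if_neg hn]
        have hih := ih rest (pre ++ [c]) acc hlen
        rw [List.reverse_append, List.reverse_singleton] at hih
        exact hih

lemma pv_splitOn_eq (s : List Char) : PySem.Chars.splitOn s ['\n'] = pvMySplit [] s := by
  unfold PySem.Chars.splitOn
  have := pv_go_mySplit (s.length + 1) s [] [] (by omega)
  rw [List.reverse_nil] at this
  simpa using this

-- ===== VERDICT (by name: the statement is the Claim_ definition above) =====
theorem custom_coding_style_brace_placement_spec : Claim_equal_custom_coding_style_brace_placement := by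
  intro node _
  unfold Spec_custom_coding_style_brace_placement
  unfold custom_coding_style_brace_placement custom_coding_style_brace_placement_alt
  by_cases h : (PySem.Dict.mk node).getD "source" "" = ""
  · simp [h]
  · rw [if_neg h, if_neg h]
    set source := (PySem.Dict.mk node).getD "source" "" with hsrc
    have hsplit : (PySem.Str.split? source "\n").getD []
        = (PySem.Chars.splitOn source.toList ['\n']).map String.ofList := by
      unfold PySem.Str.split? PySem.Chars.split?
      have : ("\n".toList : List Char) = ['\n'] := by decide
      simp [this]
    rw [hsplit, pv_loop_eq]
    have hmap : ((PySem.Chars.splitOn source.toList ['\n']).map String.ofList).map String.toList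
        = PySem.Chars.splitOn source.toList ['\n'] := by
      rw [List.map_map]
      apply List.map_id''
      intro l
      simp
    rw [hmap, pv_splitOn_eq]
    have hB := pv_scan_linesAny source.toList pvInit
    simp only [pvInit] at hB
    show (pvMySplit [] source.toList).any pvATest
        = pvScanB (source.toList ++ ['\n']) false none false
    rw [hB]
    have hS := pv_linesAny_split source.toList []
    rw [List.foldl_nil] at hS
    simp only [pvInit] at hS
    rw [hS]
    rw [funext pv_perLine]
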